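-- pv_equiv track=rewrite | github.com/davidhf2/IS452 | final_version.py | get_simple_page_number_from_marc_300
-- ===== SOURCE A (Python) =====
-- def get_simple_page_number_from_marc_300(marc_300):
-- 	simple_page_number = ""
-- 	for char in marc_300:
-- 		if char.isnumeric():
-- 			simple_page_number = simple_page_number + char
-- 		elif char == '[':
-- 			break
-- 		else:
-- 			continue
-- 	return simple_page_number
-- ===== SOURCE B (Python) =====
-- def get_simple_page_number_from_marc_300(marc_300):
-- 	end = marc_300.find('[')
-- 	if end < 0:
-- 		end = len(marc_300)
-- 	digits = []
-- 	i = end - 1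
-- 	while i >= 0:
-- 		c = marc_300[i]
-- 		if c.isnumeric():
-- 			digits.append(c)
-- 		i -= 1
-- 	digits.reverse()
-- 	return ''.join(digits)
-- ===== Notes on version B (the rewrite author's own statement) =====
-- stated objective: alternative
-- what changed: Replaces A's single forward loop with break and string concatenation by two stages: locate the bracket boundary with str.find, then walk the indices below it backwards with a descending while-loop collecting numeric chars into a list, reversing the list at the end.
import Mathlib
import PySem

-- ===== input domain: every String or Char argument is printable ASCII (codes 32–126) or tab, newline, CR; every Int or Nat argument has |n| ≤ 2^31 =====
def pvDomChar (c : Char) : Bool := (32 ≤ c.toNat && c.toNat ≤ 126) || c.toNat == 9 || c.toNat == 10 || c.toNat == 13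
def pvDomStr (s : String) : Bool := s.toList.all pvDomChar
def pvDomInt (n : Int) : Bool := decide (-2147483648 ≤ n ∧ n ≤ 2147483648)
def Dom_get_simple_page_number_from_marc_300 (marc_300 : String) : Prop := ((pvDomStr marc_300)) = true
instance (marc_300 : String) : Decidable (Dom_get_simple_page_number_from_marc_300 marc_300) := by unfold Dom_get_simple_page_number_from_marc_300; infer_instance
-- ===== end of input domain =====

-- B replaces A's forward loop-with-break by: find the bracket boundary with str.find, then a descending index loop collecting digits back-to-front, reversed at the end (alternative decomposition, same cost).


-- ===== PORT A =====
-- the for-loop with break: recurse over the chars, carrying the accumulated string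
-- (char.isnumeric() ported as PySem.Chars.isdigit — exact on the ASCII domain)
def pvA_loop : List Char → List Char → List Char
  | [], acc => acc
  | c :: cs, acc =>
    if PySem.Chars.isdigit c then pvA_loop cs (acc ++ [c])
    else if c = '[' then acc
    else pvA_loop cs acc

def get_simple_page_number_from_marc_300 (marc_300 : String) : String :=
  String.mk (pvA_loop marc_300.toList [])

-- ===== PORT B =====
-- while i >= 0: inspect marc_300[i], descending; fuel = i+1 (loop runs from end-1 down to 0)
-- (the index is always in range — 0 ≤ i < end ≤ len — so getD is exact for marc_300[i])
def pvB_loop (chars : List Char) : Nat → List Char → List Char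
  | 0, digits => digits
  | i + 1, digits =>
      let c := chars.getD i ' '
      pvB_loop chars i (if PySem.Chars.isdigit c then digits ++ [c] else digits)

-- end = marc_300.find('['); if end < 0: end = len; then the descending loop, reverse, join
def get_simple_page_number_from_marc_300_alt (marc_300 : String) : String :=
  let chars := marc_300.toList
  let f := PySem.Chars.find chars ['[']
  let e : Nat := if f < 0 then chars.length else f.toNat
  String.mk ((pvB_loop chars e []).reverse)

-- ===== PRECONDITION & SPEC =====
def Spec_get_simple_page_number_from_marc_300 (marc_300 : String) (out : String) : Prop := out = get_simple_page_number_from_marc_300_alt marc_300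
instance (marc_300 : String) (out : String) : Decidable (Spec_get_simple_page_number_from_marc_300 marc_300 out) := by unfold Spec_get_simple_page_number_from_marc_300; infer_instance

-- ===== CLAIM =====
def Claim_equal_get_simple_page_number_from_marc_300 : Prop := ∀ (marc_300 : String), Dom_get_simple_page_number_from_marc_300 marc_300 → Spec_get_simple_page_number_from_marc_300 marc_300 (get_simple_page_number_from_marc_300 marc_300)

-- ===== LEMMAS AND PROOFS =====
theorem pvA_loop_eq (l acc : List Char) :
    pvA_loop l acc = acc ++ (l.takeWhile (· ≠ '[')).filter PySem.Chars.isdigit := by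
  induction l generalizing acc with
  | nil => simp [pvA_loop]
  | cons c cs ih =>
    by_cases hb : c = '['
    · subst hb
      simp [pvA_loop, PySem.Chars.isdigit, List.takeWhile]
    · by_cases hd : PySem.Chars.isdigit c
      · simp [pvA_loop, hd, hb, List.takeWhile, ih]
      · simp [pvA_loop, hd, hb, List.takeWhile, ih]

theorem pvB_loop_eq (l : List Char) (n : Nat) (hn : n ≤ l.length) (ds : List Char) :
    pvB_loop l n ds = ds ++ ((l.take n).filter PySem.Chars.isdigit).reverse := by
  induction n generalizing ds with
  | zero => simp [pvB_loop]
  | succ k ih =>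
    have hk : k < l.length := Nat.lt_of_succ_le hn
    have hget : l.getD k ' ' = l[k] := by
      simp [List.getD, List.getElem?_eq_getElem hk]
    have htake : l.take (k + 1) = l.take k ++ [l[k]] := by
      rw [List.take_succ]
      simp [List.getElem?_eq_getElem hk]
    rw [pvB_loop]
    simp only [hget]
    rw [ih (Nat.le_of_lt hk), htake, List.filter_append]
    by_cases hd : PySem.Chars.isdigit l[k]
    · simp [hd, List.reverse_append]
    · simp [hd]

theorem singleton_prefix_drop (l : List Char) (i : Nat) (a : Char) :
    [a] <+: l.drop i ↔ l[i]? = some a := by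
  have hidx : (l.drop i)[0]? = l[i]? := by
    rw [List.getElem?_drop]
    simp
  rw [← hidx]
  cases h : l.drop i with
  | nil => simp
  | cons x t =>
    constructor
    · rintro ⟨s, hs⟩
      cases hs
      simp
    · intro h0
      simp at h0
      subst h0
      exact ⟨t, rfl⟩

theorem takeWhile_eq_take (l : List Char) (j : Nat)
    (h1 : ∀ i, i < j → l[i]? ≠ some '[')
    (h2 : j = l.length ∨ l[j]? = some '[') :
    l.takeWhile (· ≠ '[') = l.take j := by
  induction l generalizing j with
  | nil => simp
  | cons c t ih =>
    cases j with
    | zero =>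
      rcases h2 with h2 | h2
      · simp at h2
      · simp at h2
        subst h2
        simp [List.takeWhile]
    | succ k =>
      have hc : decide (c ≠ '[') = true := by
        have := h1 0 (Nat.succ_pos k)
        simpa using this
      rw [List.take_succ_cons,
        List.takeWhile_cons_of_pos (p := fun x => decide (x ≠ '[')) (l := t) hc]
      refine congrArg (c :: ·) (ih k ?_ ?_)
      · intro i hi
        have := h1 (i + 1) (Nat.succ_lt_succ hi)
        simpa using this
      · rcases h2 with h2 | h2
        · left; simpa using h2
        · right; simpa using h2

-- the boundary stage: take e = takeWhile (· ≠ '['), where e is B's end index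
theorem take_end_eq (l : List Char) :
    (let f := PySem.Chars.find l ['[']
     let e : Nat := if f < 0 then l.length else f.toNat
     l.take e) = l.takeWhile (· ≠ '[') ∧
    (let f := PySem.Chars.find l ['[']
     (if f < 0 then l.length else f.toNat) ≤ l.length) := by
  by_cases hneg : PySem.Chars.find l ['['] < 0
  · have hne : PySem.Chars.find l ['['] = -1 := by
      have := PySem.Chars.neg_one_le_find l ['[']
      omega
    have hnin : ¬ ['['] <:+: l := (PySem.Chars.find_eq_neg_one_iff l ['[']).mp hne
    constructor
    · simp only [hneg, if_pos]
      rw [List.take_length]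
      symm
      rw [List.takeWhile_eq_self_iff]
      intro x hx
      simp only [decide_eq_true_eq]
      intro hxeq
      subst hxeq
      exact hnin ((List.singleton_infix_iff _ _).mpr hx)
    · simp [hneg]
  · have hpos : 0 ≤ PySem.Chars.find l ['['] := by omega
    obtain ⟨hpre, hmin⟩ := PySem.Chars.find_spec (s := l) (sub := ['[']) hpos
    have hlen : PySem.Chars.find l ['['] ≤ (l.length : Int) := PySem.Chars.find_le_length l ['[']
    have hle : (PySem.Chars.find l ['[']).toNat ≤ l.length := by omega
    constructor
    · simp only [hneg, if_neg, not_false_iff]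
      symm
      apply takeWhile_eq_take
      · intro i hi hsome
        exact hmin i hi ((singleton_prefix_drop l i '[').mpr hsome)
      · right
        exact (singleton_prefix_drop l _ '[').mp hpre
    · simpa [hneg] using hle

-- ===== VERDICT =====
theorem get_simple_page_number_from_marc_300_spec : Claim_equal_get_simple_page_number_from_marc_300 := by
  intro s _
  unfold Spec_get_simple_page_number_from_marc_300 get_simple_page_number_from_marc_300 get_simple_page_number_from_marc_300_alt
  obtain ⟨h1, h2⟩ := take_end_eq s.toList
  simp only at h1 h2 ⊢
  rw [pvB_loop_eq _ _ h2, pvA_loop_eq]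
  simp only [List.nil_append, List.reverse_reverse]
  rw [← h1]
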